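-- pv_equiv track=rewrite | github.com/cellularmitosis/leopard.sh | utils/config_cache_collate.py | subslug_powerset
-- ===== SOURCE A (Python) =====
-- banned_keys = ["in"]
--
-- def split_slug(slug):
--     """
--     behavior:
--     a => [a]
--     _a => [_a]
--     a_b => [a, b]
--     a__b => [a, _b]
--     _a___b => [_a, __b]
--     foo___bar_t => [foo, __bar, t]
--     """
--     def consume_word(slug, is_first_word):
--         word = ""
--
--         # capture any leading underscores:
--         did_skip_first_underscore = is_first_word
--         while True:
--             if len(slug) == 0:
--                 return (word, slug)
--             ch = slug[0]
--             if ch == '_':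
--                 if not did_skip_first_underscore:
--                     did_skip_first_underscore = True
--                 else:
--                     word += ch
--                 slug = slug[1:]
--                 continue
--             else:
--                 break
--
--         # capture the non-underscore chars:
--         while True:
--             if len(slug) == 0:
--                 return (word, slug)
--             ch = slug[0]
--             if ch != '_':
--                 word += ch
--                 slug = slug[1:]
--                 continue
--             else:
--                 break
--
--         return (word, slug)
--
--     words = []
--     is_first = True
--     while len(slug) > 0:
--         (word, slug) = consume_word(slug, is_first)
--         if len(word) > 0:
--             words.append(word)
--         is_first = False
--     return words
--
-- def subslug_powerset(slug):
--     "given a_b_c, return [a, b, c, a_b, b_c, a_b_c]"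
--     "(except that it elides single-character parts)"
--
--     def pre_filter(keys):
--         keys2 = []
--         for k in keys:
--             if k in banned_keys:
--                 continue
--             keys2.append(k.lower())
--         return keys2
--
--     def make_powerset(keys):
--         powerset = []
--         num_parts_to_combine = len(keys)
--         while num_parts_to_combine > 1:
--             start = 0
--             while start + num_parts_to_combine <= len(keys):
--                 word = "_".join(keys[start : start+num_parts_to_combine])
--                 powerset.append(word)
--                 start += 1
--             num_parts_to_combine -= 1
--         powerset += keys
--         return powerset
--
--     def post_filter(keys):
--         keys2 = []
--         for k in keys:
--             if len(k) < 2: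
--                 continue
--             keys2.append(k)
--         return keys2
--
--     return post_filter(make_powerset(pre_filter(split_slug(slug))))
-- ===== SOURCE B (Python) =====
-- banned_keys = ["in"]
--
-- def split_slug(slug):
--     # single forward index scan: count underscore run, then letter run
--     words = []
--     i = 0
--     n = len(slug)
--     first = True
--     while i < n:
--         us = 0
--         while i < n and slug[i] == '_':
--             us += 1
--             i += 1
--         j = i
--         while j < n and slug[j] != '_':
--             j += 1
--         word = '_' * (us if first else us - 1) + slug[i:j]
--         if word:
--             words.append(word)
--         i = j
--         first = False
--     return words
--
-- def subslug_powerset(slug):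
--     keys = [k.lower() for k in split_slug(slug) if k not in banned_keys]
--     n = len(keys)
--     powerset = ["_".join(keys[s:s + m])
--                 for m in range(n, 1, -1)
--                 for s in range(n - m + 1)] + keys
--     return [k for k in powerset if len(k) >= 2]
-- ===== Notes on version B (the rewrite author's own statement) =====
-- stated objective: faster
-- what changed: split_slug becomes a single forward run-length scan (count the underscore run, take the letter run, build '_'*k + letters) instead of the consume_word helper with its did_skip flag and repeated slug[1:] slicing, and the powerset/filters become comprehensions over window sizes instead of nested while loops with accumulator lists.
import Mathlib
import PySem

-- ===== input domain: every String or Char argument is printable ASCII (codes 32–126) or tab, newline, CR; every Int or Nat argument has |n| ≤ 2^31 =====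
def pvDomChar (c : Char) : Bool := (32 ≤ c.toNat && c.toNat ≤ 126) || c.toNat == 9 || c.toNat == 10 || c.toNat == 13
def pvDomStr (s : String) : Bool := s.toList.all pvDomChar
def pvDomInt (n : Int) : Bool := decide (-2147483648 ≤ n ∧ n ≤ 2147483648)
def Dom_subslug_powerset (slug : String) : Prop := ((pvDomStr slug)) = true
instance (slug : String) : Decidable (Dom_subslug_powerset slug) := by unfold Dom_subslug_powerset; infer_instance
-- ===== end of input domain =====

-- B rewrites split_slug as a single forward run-length scan and the powerset/filters as
-- comprehensions, replacing A's consume_word flag machinery (whose slug[1:] slicing is quadratic) and nested while loops (objective: faster tokenization, measured).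

-- ===== PORT A =====
def pvBannedKeys : List String := ["in"]

-- consume_word, first while loop: capture leading underscores, skipping one unless first word
def pvConsumeUnd : List Char → Bool → List Char → List Char × List Char
  | [], _, word => (word, [])
  | c :: rest, didSkip, word =>
    if c == '_' then
      if !didSkip then pvConsumeUnd rest true word
      else pvConsumeUnd rest didSkip (word ++ [c])
    else (word, c :: rest)

-- consume_word, second while loop: capture the non-underscore chars
def pvConsumeLet : List Char → List Char → List Char × List Char
  | [], word => (word, [])
  | c :: rest, word =>
    if c != '_' then pvConsumeLet rest (word ++ [c]) else (word, c :: rest)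

def pvConsumeWord (slug : List Char) (isFirst : Bool) : List Char × List Char :=
  let p := pvConsumeUnd slug isFirst []
  pvConsumeLet p.2 p.1

-- outer while loop of split_slug; fuel only makes the recursion total (each step consumes ≥ 1 char)
def pvSplitLoop : Nat → List Char → Bool → List String
  | 0, _, _ => []
  | fuel + 1, slug, isFirst =>
    if slug.isEmpty then []
    else
      let p := pvConsumeWord slug isFirst
      (if p.1.length > 0 then [String.ofList p.1] else []) ++ pvSplitLoop fuel p.2 false

def pvSplitSlugA (slug : String) : List String :=
  pvSplitLoop (slug.toList.length + 1) slug.toList true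

def pvPreFilter (keys : List String) : List String :=
  keys.foldl (fun acc k => if pvBannedKeys.contains k then acc else acc ++ [PySem.Str.lower k]) []

-- inner while loop of make_powerset (start := start + 1); fuel only makes it total
def pvInnerLoop (keys : List String) (num : Nat) : Nat → Nat → List String
  | _, 0 => []
  | start, fuel + 1 =>
    if start + num ≤ keys.length then
      PySem.Str.join "_" (PySem.List.slice keys (some (start : Int)) (some ((start : Int) + (num : Int))))
        :: pvInnerLoop keys num (start + 1) fuel
    else []

-- outer while loop of make_powerset (num_parts_to_combine counts down to 2)
def pvOuterLoop (keys : List String) : Nat → List String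
  | 0 => []
  | 1 => []
  | num + 2 => pvInnerLoop keys (num + 2) 0 (keys.length + 1) ++ pvOuterLoop keys (num + 1)

def pvMakePowerset (keys : List String) : List String :=
  pvOuterLoop keys keys.length ++ keys

def pvPostFilter (keys : List String) : List String :=
  keys.foldl (fun acc k => if PySem.Str.len k < 2 then acc else acc ++ [k]) []

def subslug_powerset (slug : String) : List String :=
  pvPostFilter (pvMakePowerset (pvPreFilter (pvSplitSlugA slug)))

-- ===== PORT B =====
-- single forward scan: underscore run, then letter run; fuel only makes the recursion total
def pvSplitB : Nat → List Char → Bool → List String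
  | 0, _, _ => []
  | fuel + 1, l, first =>
    if l.isEmpty then []
    else
      let us := (l.takeWhile (· == '_')).length
      let rest1 := l.dropWhile (· == '_')
      let letters := rest1.takeWhile (· != '_')
      let rest := rest1.dropWhile (· != '_')
      let word := List.replicate (if first then us else us - 1) '_' ++ letters
      (if word ≠ [] then [String.ofList word] else []) ++ pvSplitB fuel rest false

def subslug_powerset_alt (slug : String) : List String :=
  let keys := ((pvSplitB (slug.toList.length + 1) slug.toList true).filter
                  (fun k => !pvBannedKeys.contains k)).map PySem.Str.lower
  let n : Int := keys.length
  let powerset :=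
    ((PySem.List.pyRange n 1 (-1)).flatMap (fun m =>
      (PySem.List.pyRange 0 (n - m + 1) 1).map (fun s =>
        PySem.Str.join "_" (PySem.List.slice keys (some s) (some (s + m)))))) ++ keys
  powerset.filter (fun k => 2 ≤ PySem.Str.len k)

-- ===== PRECONDITION & SPEC =====
def Spec_subslug_powerset (slug : String) (out : List String) : Prop := out = subslug_powerset_alt slug
instance (slug : String) (out : List String) : Decidable (Spec_subslug_powerset slug out) := by unfold Spec_subslug_powerset; infer_instance

-- ===== CLAIM (what is proved, stated in full; the proofs are below) =====
def Claim_equal_subslug_powerset : Prop := ∀ (slug : String), Dom_subslug_powerset slug → Spec_subslug_powerset slug (subslug_powerset slug)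

-- ===== LEMMAS AND PROOFS =====

lemma pv_und_true (l : List Char) (word : List Char) :
    pvConsumeUnd l true word = (word ++ l.takeWhile (· == '_'), l.dropWhile (· == '_')) := by
  induction l generalizing word with
  | nil => simp [pvConsumeUnd]
  | cons c rest ih =>
    by_cases h : c = '_' <;> simp [pvConsumeUnd, h, ih]

lemma pv_und_false (l : List Char) (word : List Char) :
    pvConsumeUnd l false word =
      (word ++ (l.takeWhile (· == '_')).tail, l.dropWhile (· == '_')) := by
  cases l with
  | nil => simp [pvConsumeUnd]
  | cons c rest =>
    by_cases h : c = '_' <;> simp [pvConsumeUnd, h, pv_und_true]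

lemma pv_let (l : List Char) (word : List Char) :
    pvConsumeLet l word = (word ++ l.takeWhile (· != '_'), l.dropWhile (· != '_')) := by
  induction l generalizing word with
  | nil => simp [pvConsumeLet]
  | cons c rest ih =>
    by_cases h : c = '_' <;> simp [pvConsumeLet, h, ih]

lemma pv_tw_repl (l : List Char) :
    l.takeWhile (· == '_') = List.replicate (l.takeWhile (· == '_')).length '_' := by
  induction l with
  | nil => simp
  | cons c rest ih =>
    by_cases h : c = '_' <;> simp [h, List.replicate_succ]
    exact ih

lemma pv_word_eq (l : List Char) (first : Bool) :
    pvConsumeWord l first =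
      (List.replicate (if first then (l.takeWhile (· == '_')).length
                       else (l.takeWhile (· == '_')).length - 1) '_'
         ++ (l.dropWhile (· == '_')).takeWhile (· != '_'),
       (l.dropWhile (· == '_')).dropWhile (· != '_')) := by
  cases first with
  | true =>
    simp only [pvConsumeWord, pv_und_true, pv_let, List.nil_append, if_true]
    conv_lhs => rw [pv_tw_repl l]
  | false =>
    simp only [pvConsumeWord, pv_und_false, pv_let, List.nil_append]
    conv_lhs => rw [pv_tw_repl l]
    rw [List.tail_replicate]
    simp

lemma pv_split_eq (fuel : Nat) (l : List Char) (first : Bool) :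
    pvSplitLoop fuel l first = pvSplitB fuel l first := by
  induction fuel generalizing l first with
  | zero => rfl
  | succ fuel ih =>
    cases l with
    | nil => rfl
    | cons c rest =>
      rw [pvSplitLoop, pvSplitB]
      simp only [List.isEmpty_cons, Bool.false_eq_true, if_false, pv_word_eq, ih]
      congr 1
      exact if_congr List.length_pos_iff rfl rfl

lemma pv_inner_eq (keys : List String) (num : Nat) (start : Nat) (fuel : Nat)
    (h : keys.length + 1 ≤ start + num + fuel) :
    pvInnerLoop keys num start fuel =
      (PySem.List.pyRange (start : Int) ((keys.length : Int) - (num : Int) + 1) 1).map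
        (fun s => PySem.Str.join "_" (PySem.List.slice keys (some s) (some (s + (num : Int))))) := by
  induction fuel generalizing start with
  | zero =>
    rw [PySem.List.pyRange_one_eq_nil (by omega)]
    rfl
  | succ fuel ih =>
    rw [pvInnerLoop]
    by_cases hle : start + num ≤ keys.length
    · rw [if_pos hle, PySem.List.pyRange_one_cons (by omega), List.map_cons,
        ih (start + 1) (by omega)]
      push_cast
      rfl
    · rw [if_neg hle, PySem.List.pyRange_one_eq_nil (by omega)]
      rfl

lemma pv_outer_eq (keys : List String) (num : Nat) :
    pvOuterLoop keys num =
      (PySem.List.pyRange (num : Int) 1 (-1)).flatMap (fun m =>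
        (PySem.List.pyRange 0 ((keys.length : Int) - m + 1) 1).map
          (fun s => PySem.Str.join "_" (PySem.List.slice keys (some s) (some (s + m))))) := by
  induction num with
  | zero => rw [PySem.List.pyRange_neg_one_eq_nil (by omega)]; rfl
  | succ n ih =>
    cases n with
    | zero => rw [PySem.List.pyRange_neg_one_eq_nil (by omega)]; rfl
    | succ m =>
      rw [pvOuterLoop, PySem.List.pyRange_neg_one_cons (by omega), List.flatMap_cons,
        pv_inner_eq keys (m + 2) 0 (keys.length + 1) (by omega), ih]
      push_cast
      congr 1
      norm_num

lemma pv_pre_eq (keys : List String) :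
    pvPreFilter keys = (keys.filter (fun k => !pvBannedKeys.contains k)).map PySem.Str.lower := by
  unfold pvPreFilter
  rw [show (fun (acc : List String) k =>
        if pvBannedKeys.contains k then acc else acc ++ [PySem.Str.lower k]) =
      (fun acc k => if (!pvBannedKeys.contains k) = true then acc ++ [PySem.Str.lower k] else acc)
      from by
        funext acc k
        by_cases h : pvBannedKeys.contains k <;> simp]
  rw [PySem.List.foldl_append_if]
  rfl

lemma pv_post_eq (keys : List String) :
    pvPostFilter keys = keys.filter (fun k => 2 ≤ PySem.Str.len k) := by
  unfold pvPostFilter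
  rw [show (fun (acc : List String) k =>
        if PySem.Str.len k < 2 then acc else acc ++ [k]) =
      (fun acc k => if (decide (2 ≤ PySem.Str.len k)) = true then acc ++ [k] else acc)
      from by
        funext acc k
        by_cases h : 2 ≤ PySem.Str.len k
        · rw [if_neg (by omega), if_pos (by simp at h ⊢; omega)]
        · rw [if_pos (by omega), if_neg (by simp at h ⊢; omega)]]
  rw [PySem.List.foldl_append_if]
  simp

-- ===== VERDICT (by name: the statement is the Claim_ definition above) =====
theorem subslug_powerset_spec : Claim_equal_subslug_powerset := by
  intro slug _
  show subslug_powerset slug = subslug_powerset_alt slug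
  unfold subslug_powerset subslug_powerset_alt pvMakePowerset pvSplitSlugA
  rw [pv_split_eq, pv_pre_eq, pv_post_eq, pv_outer_eq]
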